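-- pv_equiv track=rewrite | github.com/bmlsj/algorithm | 프로그래머스/lv2/87390. n＾2 배열 자르기/n＾2 배열 자르기.py | solution
-- ===== SOURCE A (Python) =====
-- def solution(n, left, right):
--
--     cnt = 0
--     ans = []
--     for i in range((right-left)+1):
--         idx = left + i
--         row = idx // n
--         col = idx % n
--
--         ans.append(max(col, row) + 1)
--
--
--     return ans
-- ===== SOURCE B (Python) =====
-- def solution(n, left, right):
--     # Row-wise run-length construction: row r of the n x n array is (r+1) repeated
--     # (r+1) times followed by r+2, ..., n.  Emit each touched row clipped to the
--     # needed column window [lo, hi), so total work is O(right-left+1).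
--     r0, c0 = left // n, left % n
--     r1, c1 = right // n, right % n
--     out = []
--     for r in range(r0, r1 + 1):
--         lo = c0 if r == r0 else 0
--         hi = c1 + 1 if r == r1 else n
--         k = max(min(r + 1, hi), lo)    # where the constant (r+1)-run ends inside the window
--         out += [r + 1] * (k - lo)
--         out += range(k + 1, hi + 1)
--     return out
-- ===== Notes on version B (the rewrite author's own statement) =====
-- stated objective: alternative
-- what changed: B emits each touched row of the n x n array whole by run-length construction ([r+1] repeated, then a consecutive range) clipped to the needed column window, avoiding A's per-element //, % and max over the index range.
-- outside the precondition, e.g. on solution(-3, 0, 2): A returns [1, 0, 0], B returns []; on solution(0, 1, 0): A returns [], B raises ZeroDivisionError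
import Mathlib
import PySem

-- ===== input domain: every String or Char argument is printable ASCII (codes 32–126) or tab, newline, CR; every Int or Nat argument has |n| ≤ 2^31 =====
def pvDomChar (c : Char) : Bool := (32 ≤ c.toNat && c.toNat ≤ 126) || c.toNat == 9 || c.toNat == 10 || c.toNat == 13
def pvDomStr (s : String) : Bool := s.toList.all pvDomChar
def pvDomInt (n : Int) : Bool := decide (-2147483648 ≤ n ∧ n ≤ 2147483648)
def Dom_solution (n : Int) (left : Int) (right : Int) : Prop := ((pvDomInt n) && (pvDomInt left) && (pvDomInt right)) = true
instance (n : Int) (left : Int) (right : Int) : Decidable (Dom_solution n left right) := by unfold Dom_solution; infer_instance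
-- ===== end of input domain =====

-- B emits each touched row of the n×n array whole by run-length construction (a replicate run
-- then a consecutive range), clipped to the needed column window, instead of A's per-element
-- max(idx//n, idx%n)+1 over the index range; same cost.


-- ===== PORT A =====
-- for i in range(right-left+1): idx = left+i; row = idx//n; col = idx%n; ans.append(max(col,row)+1)
def solution (n : Int) (left : Int) (right : Int) : List Int :=
  (PySem.List.pyRange 0 (right - left + 1) 1).foldl
    (fun ans i =>
      let idx := left + i
      let row := PySem.Int.floordiv idx n
      let col := PySem.Int.mod idx n
      ans ++ [max col row + 1])
    []

-- ===== PORT B =====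
-- B-side helper: the loop body — lo = c0 if r == r0 else 0; hi = c1+1 if r == r1 else n;
-- k = max(min(r+1, hi), lo); out += [r+1]*(k-lo); out += range(k+1, hi+1)
def pvRow (n r0 r1 c0 c1 : Int) (out : List Int) (r : Int) : List Int :=
  let lo := if r = r0 then c0 else 0
  let hi := if r = r1 then c1 + 1 else n
  let k := max (min (r + 1) hi) lo
  out ++ List.replicate (k - lo).toNat (r + 1) ++ PySem.List.pyRange (k + 1) (hi + 1) 1

-- r0, c0 = left // n, left % n; r1, c1 = right // n, right % n; loop rows r0..r1; return out
def solution_alt (n : Int) (left : Int) (right : Int) : List Int :=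
  let r0 := PySem.Int.floordiv left n
  let c0 := PySem.Int.mod left n
  let r1 := PySem.Int.floordiv right n
  let c1 := PySem.Int.mod right n
  (PySem.List.pyRange r0 (r1 + 1) 1).foldl (pvRow n r0 r1 c0 c1) []

-- ===== PRECONDITION & SPEC =====
-- Pre_ excludes n ≤ 0: for n = 0 the Python A raises ZeroDivisionError whenever the loop runs
-- (and B raises already when computing left // 0), and for n < 0 (no n×n array exists) A's
-- values are artefacts of Python's negative-divisor floor semantics which B's row construction
-- does not reproduce.
def Pre_solution (n : Int) (left : Int) (right : Int) : Prop := 1 ≤ n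
instance (n : Int) (left : Int) (right : Int) : Decidable (Pre_solution n left right) := by unfold Pre_solution; infer_instance
def pvWitness_solution : Int × Int × Int := (3, 2, 5)
def Spec_solution (n : Int) (left : Int) (right : Int) (out : List Int) : Prop := out = solution_alt n left right
instance (n : Int) (left : Int) (right : Int) (out : List Int) : Decidable (Spec_solution n left right out) := by unfold Spec_solution; infer_instance

-- ===== CLAIM (what is proved, stated in full; the proofs are below) =====
def Claim_equal_solution : Prop := ∀ (n : Int) (left : Int) (right : Int), Dom_solution n left right → Pre_solution n left right → Spec_solution n left right (solution n left right)

-- ===== LEMMAS AND PROOFS =====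

-- the per-index value A computes (with n > 0, so floordiv/mod are ediv/emod)
def pvVal (n idx : Int) : Int := max (idx % n) (idx / n) + 1

-- one clipped run-length row equals the per-index values over its index window
theorem row_clip_eq (n : Int) (hn : 1 ≤ n) (r lo hi : Int)
    (hlo : 0 ≤ lo) (hhi : hi ≤ n) :
    List.replicate (max (min (r + 1) hi) lo - lo).toNat (r + 1)
      ++ PySem.List.pyRange (max (min (r + 1) hi) lo + 1) (hi + 1) 1
    = (PySem.List.pyRange (n * r + lo) (n * r + hi) 1).map (pvVal n) := by
  set K : Int := max (min (r + 1) hi) lo with hK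
  have hK0 : lo ≤ K := le_max_right _ _
  apply List.ext_getElem
  · simp [PySem.List.length_pyRange_one]
    omega
  · intro i h1 h2
    have hi2 : (i : Int) < hi - lo := by
      simp [PySem.List.length_pyRange_one] at h2
      omega
    have hcn : lo + (i : Int) < n := by omega
    have hq : (n * r + (lo + (i : Int))) / n = r := by
      rw [add_comm, mul_comm n r, Int.add_mul_ediv_right _ _ (by omega : n ≠ 0)]
      rw [Int.ediv_eq_zero_of_lt (by omega) hcn]; ring
    have hm : (n * r + (lo + (i : Int))) % n = lo + (i : Int) := by
      rw [add_comm, Int.add_mul_emod_self_left]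
      exact Int.emod_eq_of_lt (by omega) hcn
    by_cases hcase : i < (K - lo).toNat
    · rw [List.getElem_append_left (by simpa using hcase)]
      rw [List.getElem_replicate]
      rw [List.getElem_map, PySem.List.getElem_pyRange_one]
      simp only [pvVal]
      rw [show n * r + lo + (i : Int) = n * r + (lo + (i : Int)) from by ring, hq, hm]
      omega
    · rw [List.getElem_append_right (by simpa using hcase)]
      rw [PySem.List.getElem_pyRange_one]
      rw [List.getElem_map, PySem.List.getElem_pyRange_one]
      simp only [pvVal, List.length_replicate]
      rw [show n * r + lo + (i : Int) = n * r + (lo + (i : Int)) from by ring, hq, hm]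
      have : (K - lo).toNat ≤ i := Nat.le_of_not_lt hcase
      omega

-- the rows after the first flatten to the per-index values of their index range
theorem tail_loop (n r0 r1 c0 c1 : Int) (hn : 1 ≤ n) (hc1 : 0 ≤ c1) (hc1n : c1 < n) :
    ∀ (m : Nat) (t : Int), r0 < t → (r1 + 1 - t).toNat = m → ∀ (acc : List Int),
      (PySem.List.pyRange t (r1 + 1) 1).foldl (pvRow n r0 r1 c0 c1) acc
      = acc ++ (PySem.List.pyRange (n * t) (n * r1 + c1 + 1) 1).map (pvVal n) := by
  intro m
  induction m with
  | zero =>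
    intro t ht h acc
    have ht2 : r1 + 1 ≤ t := by omega
    have h2 : n * (r1 + 1) ≤ n * t := by nlinarith
    have h3 : n * (r1 + 1) = n * r1 + n := by ring
    rw [PySem.List.pyRange_one_eq_nil (by omega), PySem.List.pyRange_one_eq_nil (by omega)]
    simp
  | succ m ih =>
    intro t ht h acc
    rw [PySem.List.pyRange_one_cons (by omega)]
    simp only [List.foldl_cons]
    rw [ih (t + 1) (by omega) (by omega)]
    unfold pvRow
    rw [if_neg (by omega : ¬ t = r0)]
    by_cases hlast : t = r1
    · subst hlast
      rw [if_pos rfl]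
      simp only [sub_zero]
      rw [PySem.List.pyRange_one_eq_nil (by nlinarith : n * t + c1 + 1 ≤ n * (t + 1))]
      have hre := row_clip_eq n hn t 0 (c1 + 1) le_rfl (by omega)
      simp only [add_zero] at hre
      rw [show n * t + (c1 + 1) = n * t + c1 + 1 from by ring] at hre
      rw [← hre]
      simp [List.append_assoc]
    · rw [if_neg hlast]
      simp only [sub_zero]
      have hre := row_clip_eq n hn t 0 n le_rfl le_rfl
      simp only [add_zero] at hre
      rw [show n * t + n = n * (t + 1) from by ring] at hre
      have ht1 : t + 1 ≤ r1 := by omega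
      rw [PySem.List.pyRange_one_append (n * t) (n * (t + 1)) (n * r1 + c1 + 1)
        (by nlinarith) (by nlinarith), List.map_append, ← hre]
      simp [List.append_assoc]

-- the whole row loop flattens to the per-index values of [n*r0+c0, n*r1+c1+1)
theorem full_loop (n r0 r1 c0 c1 : Int) (hn : 1 ≤ n)
    (hc0 : 0 ≤ c0) (hc0n : c0 < n) (hc1 : 0 ≤ c1) (hc1n : c1 < n) :
    (PySem.List.pyRange r0 (r1 + 1) 1).foldl (pvRow n r0 r1 c0 c1) []
      = (PySem.List.pyRange (n * r0 + c0) (n * r1 + c1 + 1) 1).map (pvVal n) := by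
  by_cases hr : r0 ≤ r1
  · rw [PySem.List.pyRange_one_cons (by omega : r0 < r1 + 1)]
    simp only [List.foldl_cons]
    by_cases hlast : r0 = r1
    · subst hlast
      have happ : pvRow n r0 r0 c0 c1 [] r0
          = [] ++ List.replicate (max (min (r0 + 1) (c1 + 1)) c0 - c0).toNat (r0 + 1)
            ++ PySem.List.pyRange (max (min (r0 + 1) (c1 + 1)) c0 + 1) (c1 + 1 + 1) 1 := by
        unfold pvRow
        simp
      rw [PySem.List.pyRange_one_eq_nil (by omega : r0 + 1 ≤ r0 + 1)]
      simp only [List.foldl_nil]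
      rw [happ]
      have hre := row_clip_eq n hn r0 c0 (c1 + 1) hc0 (by omega)
      rw [show n * r0 + (c1 + 1) = n * r0 + c1 + 1 from by ring] at hre
      rw [← hre]
      simp
    · have happ : pvRow n r0 r1 c0 c1 [] r0
          = [] ++ List.replicate (max (min (r0 + 1) n) c0 - c0).toNat (r0 + 1)
            ++ PySem.List.pyRange (max (min (r0 + 1) n) c0 + 1) (n + 1) 1 := by
        unfold pvRow
        rw [if_pos rfl, if_neg hlast]
      have hr1 : r0 + 1 ≤ r1 := by omega
      rw [tail_loop n r0 r1 c0 c1 hn hc1 hc1n (r1 + 1 - (r0 + 1)).toNat (r0 + 1) (by omega) rfl]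
      rw [happ]
      have hre := row_clip_eq n hn r0 c0 n hc0 le_rfl
      rw [show n * r0 + n = n * (r0 + 1) from by ring] at hre
      rw [PySem.List.pyRange_one_append (n * r0 + c0) (n * (r0 + 1)) (n * r1 + c1 + 1)
        (by nlinarith) (by nlinarith), List.map_append, ← hre]
      simp [List.append_assoc]
  · have h2 : n * (r1 + 1) ≤ n * r0 := by nlinarith
    have h3 : n * (r1 + 1) = n * r1 + n := by ring
    rw [PySem.List.pyRange_one_eq_nil (by omega), PySem.List.pyRange_one_eq_nil (by omega)]
    simp

-- A's per-element pass is the same per-index values over [left, right+1)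
theorem a_side (n l rt : Int) :
    (PySem.List.pyRange 0 (rt - l + 1) 1).map
        (fun i => max ((l + i) % n) ((l + i) / n) + 1)
      = (PySem.List.pyRange l (rt + 1) 1).map (pvVal n) := by
  rw [PySem.List.pyRange_one, PySem.List.pyRange_one, List.map_map, List.map_map,
    show rt - l + 1 - 0 = rt + 1 - l from by ring]
  apply List.map_congr_left
  intro k _
  simp [pvVal]

-- ===== VERDICT (by name: the statement is the Claim_ definition above) =====
theorem solution_spec : Claim_equal_solution := by
  intro n l rt _ hn
  have hn1 : (1 : Int) ≤ n := hn
  have hb : (0 : Int) < n := by omega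
  unfold Spec_solution solution solution_alt
  rw [PySem.List.foldl_append_singleton_eq_map]
  simp only [PySem.Int.floordiv_eq_ediv_of_pos hb, PySem.Int.mod_eq_emod_of_pos hb]
  rw [full_loop n (l / n) (rt / n) (l % n) (rt % n) hn1
    (Int.emod_nonneg l (by omega)) (Int.emod_lt_of_pos l hb)
    (Int.emod_nonneg rt (by omega)) (Int.emod_lt_of_pos rt hb)]
  rw [Int.mul_ediv_add_emod l n, Int.mul_ediv_add_emod rt n]
  exact a_side n l rt
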